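-- pv_equiv track=rewrite | github.com/zytaga/courses | Other/checkio/remove_all_before.py | remove_all_before
-- ===== SOURCE A (Python) =====
-- from typing import Iterable
--
-- def remove_all_before(items: list, border: int) -> Iterable:
--
--     result = []
--     start_saving = False
--     for x in items:
--         if x == border:
--             start_saving = True
--
--         if start_saving:
--             result.append(x)
--
--     if not result:
--         return items
--     else:
--         return result
-- ===== SOURCE B (Python) =====
-- def remove_all_before(items: list, border: int):
--     try:
--         return items[items.index(border):]
--     except ValueError:
--         return items
-- ===== Notes on version B (the rewrite author's own statement) =====
-- stated objective: simpler
-- what changed: Replaces the boolean-flag accumulation loop with a single index lookup followed by a slice; the not-found case returns items unchanged.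
import Mathlib
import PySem

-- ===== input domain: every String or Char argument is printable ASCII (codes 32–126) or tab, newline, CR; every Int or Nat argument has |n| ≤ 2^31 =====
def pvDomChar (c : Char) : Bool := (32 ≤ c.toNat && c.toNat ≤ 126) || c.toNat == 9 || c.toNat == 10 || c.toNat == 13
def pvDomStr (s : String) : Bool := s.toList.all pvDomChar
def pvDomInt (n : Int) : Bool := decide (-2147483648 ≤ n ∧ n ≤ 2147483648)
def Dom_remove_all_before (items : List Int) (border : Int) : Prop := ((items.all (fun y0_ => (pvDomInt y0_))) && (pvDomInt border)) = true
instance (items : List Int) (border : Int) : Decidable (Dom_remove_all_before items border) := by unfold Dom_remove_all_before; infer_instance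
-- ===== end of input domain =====

-- B replaces A's boolean-flag accumulation loop by a first-occurrence lookup plus a slice (simpler decomposition, same O(n) cost).


-- ===== PORT A =====
-- loop body of A: updates (result, start_saving) for one element x
def rab_step (border : Int) (acc : List Int × Bool) (x : Int) : List Int × Bool :=
  let saving := if x == border then true else acc.2
  (if saving then acc.1 ++ [x] else acc.1, saving)

def remove_all_before (items : List Int) (border : Int) : List Int :=
  let st := items.foldl (rab_step border) ([], false)
  if st.1 = [] then items else st.1

-- ===== PORT B =====
def remove_all_before_alt (items : List Int) (border : Int) : List Int :=
  match PySem.List.index? items border with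
  | some i => PySem.List.slice items (some (i : Int)) none
  | none => items

-- ===== PRECONDITION & SPEC =====
def Spec_remove_all_before (items : List Int) (border : Int) (out : List Int) : Prop := out = remove_all_before_alt items border
instance (items : List Int) (border : Int) (out : List Int) : Decidable (Spec_remove_all_before items border out) := by unfold Spec_remove_all_before; infer_instance

-- ===== CLAIM (what is proved, stated in full; the proofs are below) =====
def Claim_equal_remove_all_before : Prop := ∀ (items : List Int) (border : Int), Dom_remove_all_before items border → Spec_remove_all_before items border (remove_all_before items border)

-- ===== LEMMAS AND PROOFS =====
lemma fold_saving (l r : List Int) (b : Int) :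
    l.foldl (rab_step b) (r, true) = (r ++ l, true) := by
  induction l generalizing r with
  | nil => simp
  | cons x xs ih =>
    rw [List.foldl_cons, show rab_step b (r, true) x = (r ++ [x], true) by simp [rab_step], ih]
    simp

lemma fold_not_mem (l : List Int) (b : Int) (hb : b ∉ l) :
    l.foldl (rab_step b) ([], false) = ([], false) := by
  induction l with
  | nil => rfl
  | cons x xs ih =>
    simp only [List.mem_cons, not_or] at hb
    rw [List.foldl_cons,
      show rab_step b ([], false) x = ([], false) by
        simp [rab_step, Ne.symm hb.1],
      ih hb.2]

lemma main_eq (items : List Int) (border : Int) :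
    remove_all_before items border = remove_all_before_alt items border := by
  induction items with
  | nil => rfl
  | cons x xs ih =>
    by_cases hx : x = border
    · subst hx
      unfold remove_all_before remove_all_before_alt
      rw [PySem.List.index?_cons_self]
      rw [List.foldl_cons, show rab_step x ([], false) x = ([x], true) by simp [rab_step],
        fold_saving]
      simp [PySem.List.slice_none_none]
    · have hstep : rab_step border ([], false) x = ([], false) := by
        simp [rab_step, hx]
      unfold remove_all_before remove_all_before_alt
      rw [PySem.List.index?_cons_of_ne xs hx, List.foldl_cons, hstep]
      unfold remove_all_before remove_all_before_alt at ih
      cases hidx : PySem.List.index? xs border with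
      | none =>
        have hmem : border ∉ xs := (PySem.List.index?_eq_none_iff _ _).mp hidx
        rw [fold_not_mem xs border hmem]
        simp
      | some i =>
        simp only [Option.map_some]
        rw [hidx] at ih
        have hne : (xs.foldl (rab_step border) ([], false)).1 ≠ [] := by
          obtain ⟨pre, suf, hxs, hlen, hpre⟩ :=
            (PySem.List.index?_eq_some_iff xs border i).mp hidx
          subst hxs
          rw [List.foldl_append, fold_not_mem pre border hpre, List.foldl_cons,
            show rab_step border ([], false) border = ([border], true) by simp [rab_step],
            fold_saving]
          simp
        simp only [hne, if_false] at ih ⊢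
        rw [ih]
        rw [PySem.List.slice_from_natCast, PySem.List.slice_from_natCast]
        simp

-- ===== VERDICT (by name: the statement is the Claim_ definition above) =====
theorem remove_all_before_spec : Claim_equal_remove_all_before := by
  intro items border _
  unfold Spec_remove_all_before
  exact main_eq items border
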